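-- pv_equiv track=rewrite | github.com/T-Srikanth/DSML | A24.py | task_scheduling
-- ===== SOURCE A (Python) =====
-- from collections import deque
-- from collections import deque
--
-- def task_scheduling(A,B):
--   cycles = 0
--   qu = deque(A)
--   for task in B:
--     process = qu.popleft()
--     while process != task: #to count cycles when the process is moved to back of the queue
--       cycles += 1
--       qu.append(process)
--       process = qu.popleft()
--     cycles += 1  #to count the cycle when the task is performed
--   return cycles
-- ===== SOURCE B (Python) =====
-- def task_scheduling(A, B):
--     qu = list(A)
--     cycles = 0
--     for task in B:
--         i = qu.index(task)
--         cycles += i + 1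
--         qu = qu[i+1:] + qu[:i]
--     return cycles
-- ===== Notes on version B (the rewrite author's own statement) =====
-- stated objective: alternative
-- what changed: Replaces the element-by-element rotate-and-requeue inner while loop with a direct first-index lookup plus one slice-based rotation per task (cycles += index+1; qu = qu[i+1:]+qu[:i]).
import Mathlib
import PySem

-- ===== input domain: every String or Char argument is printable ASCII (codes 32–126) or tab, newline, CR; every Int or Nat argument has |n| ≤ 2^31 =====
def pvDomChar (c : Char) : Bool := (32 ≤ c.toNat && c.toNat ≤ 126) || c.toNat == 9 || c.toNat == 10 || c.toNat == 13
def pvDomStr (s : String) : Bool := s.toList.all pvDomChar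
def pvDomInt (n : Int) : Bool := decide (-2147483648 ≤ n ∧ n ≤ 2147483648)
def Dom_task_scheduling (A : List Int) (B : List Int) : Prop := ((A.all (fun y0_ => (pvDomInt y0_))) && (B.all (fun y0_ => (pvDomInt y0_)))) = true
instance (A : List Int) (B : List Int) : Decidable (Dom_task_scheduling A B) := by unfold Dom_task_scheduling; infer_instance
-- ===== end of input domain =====

-- B replaces A's element-by-element rotate-and-requeue inner loop with one first-index lookup
-- plus a slice-based rotation per task (same return value, different traversal).

-- ===== PORT A =====
-- inner while loop of A: pop the front; if it is not the task, requeue it at the back and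
-- continue, counting a cycle each pop. Fuel bounds the pops; it runs out only when the
-- Python loop would raise IndexError or diverge (excluded by Pre_), returning junk there.
def pvAInner : Nat → Int → List Int → Int → (List Int × Int)
  | 0, _, qu, c => (qu, c)
  | fuel + 1, task, qu, c =>
    match qu with
    | [] => ([], c)
    | p :: rest => if p ≠ task then pvAInner fuel task (rest ++ [p]) (c + 1) else (rest, c + 1)

def task_scheduling (A : List Int) (B : List Int) : Int :=
  (B.foldl (fun (st : List Int × Int) task => pvAInner st.1.length task st.1 st.2) (A, 0)).2

-- ===== PORT B =====
def pvBStep (st : List Int × Int) (task : Int) : List Int × Int :=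
  match PySem.List.index? st.1 task with
  | some i => (st.1.drop (i + 1) ++ st.1.take i, st.2 + (i : Int) + 1)
  | none => st  -- Python's list.index raises ValueError here (excluded by Pre_)

def task_scheduling_alt (A : List Int) (B : List Int) : Int :=
  (B.foldl pvBStep (A, 0)).2

-- ===== PRECONDITION & SPEC =====
-- Pre_ excludes exactly the inputs on which A fails to return: if the multiset of B is not
-- contained in the multiset of A, A eventually pops from an empty deque (IndexError) or
-- spins forever rotating a queue that lacks the task.
def Pre_task_scheduling (A : List Int) (B : List Int) : Prop :=
  ∀ x ∈ B, B.count x ≤ A.count x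
instance (A : List Int) (B : List Int) : Decidable (Pre_task_scheduling A B) := by
  unfold Pre_task_scheduling; infer_instance
def pvWitness_task_scheduling : List Int × List Int := ([3, 1, 2, 1], [2, 1, 1])

def Spec_task_scheduling (A : List Int) (B : List Int) (out : Int) : Prop := out = task_scheduling_alt A B
instance (A : List Int) (B : List Int) (out : Int) : Decidable (Spec_task_scheduling A B out) := by unfold Spec_task_scheduling; infer_instance

-- ===== CLAIM (what is proved, stated in full; the proofs are below) =====
def Claim_equal_task_scheduling : Prop := ∀ (A : List Int) (B : List Int), Dom_task_scheduling A B → Pre_task_scheduling A B → Spec_task_scheduling A B (task_scheduling A B)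

-- ===== LEMMAS AND PROOFS =====

-- A's inner rotation loop, given enough fuel, lands exactly on B's index+slice formula.
theorem pvAInner_eq_index (fuel : Nat) :
    ∀ (qu : List Int) (task : Int) (c : Int) (i : Nat),
      PySem.List.index? qu task = some i → i < fuel →
      pvAInner fuel task qu c = (qu.drop (i + 1) ++ qu.take i, c + (i : Int) + 1) := by
  induction fuel with
  | zero => intro qu task c i _ h; omega
  | succ fuel ih =>
    intro qu task c i hidx hlt
    match qu with
    | [] => simp [PySem.List.index?] at hidx
    | p :: rest =>
      by_cases hp : p = task
      · subst hp
        rw [PySem.List.index?_cons_self] at hidx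
        obtain rfl : i = 0 := by injection hidx with h; omega
        simp [pvAInner]
      · rw [PySem.List.index?_cons_of_ne rest hp] at hidx
        rw [Option.map_eq_some_iff] at hidx
        obtain ⟨j, hj, hji⟩ := hidx
        subst hji
        have hmem : task ∈ rest := (PySem.List.index?_isSome_iff rest task).mp (by rw [hj]; rfl)
        have hlen : j < rest.length := by
          obtain ⟨hk, _, _⟩ := PySem.List.getElem_of_index?_eq_some hj
          exact hk
        have hidx' : PySem.List.index? (rest ++ [p]) task = some j := by
          rw [PySem.List.index?_append_of_mem _ hmem]; exact hj
        have hrec := ih (rest ++ [p]) task (c + 1) j hidx' (by omega)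
        simp only [pvAInner, if_pos hp, hrec, Prod.mk.injEq]
        constructor
        · rw [List.drop_append, List.take_append]
          have h1 : j + 1 - rest.length = 0 := by omega
          have h2 : j - rest.length = 0 := by omega
          simp [h1, h2, List.append_assoc]
        · push_cast; ring

-- one step: A's inner loop with fuel = queue length equals B's step, when the task is present.
theorem pvStep_eq (qu : List Int) (task : Int) (c : Int) (hmem : task ∈ qu) :
    pvAInner qu.length task qu c = pvBStep (qu, c) task := by
  have hsome : (PySem.List.index? qu task).isSome := by
    rw [PySem.List.index?_isSome_iff]; exact hmem
  obtain ⟨i, hi⟩ := Option.isSome_iff_exists.mp hsome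
  obtain ⟨hlen, _, _⟩ := PySem.List.getElem_of_index?_eq_some hi
  rw [pvAInner_eq_index qu.length qu task c i hi hlen]
  simp only [pvBStep]
  rw [PySem.List.index?_eq_idxOf?] at hi
  simp [hi]

-- B's step removes exactly one copy of the task from the queue (as a multiset).
theorem pvBStep_count (qu : List Int) (task : Int) (c : Int) (hmem : task ∈ qu) (x : Int) :
    (pvBStep (qu, c) task).1.count x + (if task = x then 1 else 0) = qu.count x := by
  have hsome : (PySem.List.index? qu task).isSome := by
    rw [PySem.List.index?_isSome_iff]; exact hmem
  obtain ⟨i, hi⟩ := Option.isSome_iff_exists.mp hsome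
  obtain ⟨hlen, hget, _⟩ := PySem.List.getElem_of_index?_eq_some hi
  simp only [pvBStep, hi]
  have hdecomp : qu = qu.take i ++ qu[i] :: qu.drop (i + 1) := by
    conv_lhs => rw [← List.take_append_drop i qu]
    congr 1
    exact List.drop_eq_getElem_cons hlen
  conv_rhs => rw [hdecomp]
  rw [List.count_append, List.count_append, hget, List.count_cons]
  by_cases h : task = x <;> simp [h] <;> omega

-- main fold invariant: while every remaining task is still available in the queue,
-- the two folds produce identical states.
theorem pvFold_eq (B : List Int) :
    ∀ (qu : List Int) (c : Int),
      (∀ x ∈ B, B.count x ≤ qu.count x) →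
      B.foldl (fun (st : List Int × Int) task => pvAInner st.1.length task st.1 st.2) (qu, c)
        = B.foldl pvBStep (qu, c) := by
  induction B with
  | nil => intro qu c _; rfl
  | cons t B ih =>
    intro qu c hcnt
    have hmem : t ∈ qu := by
      have := hcnt t (by simp)
      have : 0 < qu.count t := by
        have h1 : 0 < (t :: B).count t := by simp
        omega
      exact List.count_pos_iff.mp this
    simp only [List.foldl_cons]
    rw [pvStep_eq qu t c hmem]
    rcases hst : pvBStep (qu, c) t with ⟨qu', c'⟩
    apply ih
    intro x hx
    have hc := pvBStep_count qu t c hmem x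
    rw [hst] at hc
    have hB := hcnt x (by simp [hx])
    rw [List.count_cons] at hB
    by_cases h : t = x
    · subst h; simp at hB hc ⊢; omega
    · simp [h] at hc
      have : (if x == t then 1 else 0) = 0 := by simp [Ne.symm h]
      omega

-- ===== VERDICT (by name: the statement is the Claim_ definition above) =====
theorem task_scheduling_spec : Claim_equal_task_scheduling := by
  intro A B _ hpre
  unfold Spec_task_scheduling task_scheduling task_scheduling_alt
  rw [pvFold_eq B A 0 hpre]
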